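-- pv_equiv track=rewrite | github.com/adobortnik/Hydra | dashboard/deploy_routes.py | stagger_per_device
-- ===== SOURCE A (Python) =====
-- def stagger_per_device(assigned, slot_hours=2, start_hour=0):
--     """
--     Assign time slots PER DEVICE (so each device has its own 0-24h schedule).
--     Account 1 on device X: start_hour → start_hour+slot_hours
--     Account 2 on device X: next slot, etc.
--     """
--     # Group by device
--     device_index = {}
--     for acc in assigned:
--         ds = acc.get('device_serial')
--         if ds:
--             if ds not in device_index:
--                 device_index[ds] = 0
--             idx = device_index[ds]
--             s = (start_hour + (idx * slot_hours)) % 24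
--             e = (s + slot_hours) % 24
--             acc['start_time'] = str(s)
--             acc['end_time'] = str(e)
--             device_index[ds] += 1
--         else:
--             acc['start_time'] = '0'
--             acc['end_time'] = '0'
--     return assigned
-- ===== SOURCE B (Python) =====
-- def stagger_per_device(assigned, slot_hours=2, start_hour=0):
--     # Stateless re-implementation: instead of a running per-device counter dict,
--     # each account's slot index is computed directly as the number of earlier
--     # accounts sharing its (truthy) device_serial.
--     for i, acc in enumerate(assigned):
--         ds = acc.get('device_serial')
--         if ds:
--             idx = sum(1 for prev in assigned[:i] if prev.get('device_serial') == ds)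
--             s = (start_hour + idx * slot_hours) % 24
--             acc['start_time'] = str(s)
--             acc['end_time'] = str((s + slot_hours) % 24)
--         else:
--             acc['start_time'] = '0'
--             acc['end_time'] = '0'
--     return assigned
-- ===== Notes on version B (the rewrite author's own statement) =====
-- stated objective: alternative
-- what changed: Replaced the stateful running per-device counter dict with a stateless position-based computation: each account's slot index is obtained by counting earlier accounts with the same device serial (enumerate + prefix count), so no mutable index state is carried across the loop.
import Mathlib
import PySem

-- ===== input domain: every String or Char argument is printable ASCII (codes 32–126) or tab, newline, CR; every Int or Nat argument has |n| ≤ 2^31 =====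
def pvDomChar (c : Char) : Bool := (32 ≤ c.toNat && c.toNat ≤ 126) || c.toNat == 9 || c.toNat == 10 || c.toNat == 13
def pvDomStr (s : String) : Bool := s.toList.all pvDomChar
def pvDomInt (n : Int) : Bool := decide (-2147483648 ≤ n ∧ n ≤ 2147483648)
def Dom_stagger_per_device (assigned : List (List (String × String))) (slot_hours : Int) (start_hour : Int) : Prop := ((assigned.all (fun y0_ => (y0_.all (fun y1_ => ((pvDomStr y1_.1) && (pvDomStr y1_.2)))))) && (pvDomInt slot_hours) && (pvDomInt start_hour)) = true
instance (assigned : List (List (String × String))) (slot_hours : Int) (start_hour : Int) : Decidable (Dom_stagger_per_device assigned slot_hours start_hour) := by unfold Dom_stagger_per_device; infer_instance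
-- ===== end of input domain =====

-- B replaces A's running per-device counter dict by a stateless prefix count of equal device serials (alternative decomposition; not faster).
-- Python A and B mutate the account dicts in place; the equivalence proved here is about the RETURN value (the returned list of dicts).

-- ===== PORT A =====
-- one loop iteration of A: state = (device_index dict, accounts emitted so far)
def pvStepA (slot_hours start_hour : Int)
    (st : PySem.Dict String Int × List (List (String × String)))
    (acc : List (String × String)) :
    PySem.Dict String Int × List (List (String × String)) :=
  let accD := PySem.Dict.mk acc
  match accD.get? "device_serial" with
  | some d =>
    if d ≠ "" then
      -- `if ds not in device_index: device_index[ds] = 0`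
      let di := if st.1.contains d then st.1 else st.1.insert d 0
      let idx := di.getD d 0
      let s := PySem.Int.mod (start_hour + idx * slot_hours) 24
      let e := PySem.Int.mod (s + slot_hours) 24
      let acc' := ((accD.insert "start_time" (PySem.Int.toStr s)).insert "end_time" (PySem.Int.toStr e)).items
      (di.insert d (idx + 1), st.2 ++ [acc'])
    else
      (st.1, st.2 ++ [((accD.insert "start_time" "0").insert "end_time" "0").items])
  | none =>
      (st.1, st.2 ++ [((accD.insert "start_time" "0").insert "end_time" "0").items])

def stagger_per_device (assigned : List (List (String × String))) (slot_hours : Int) (start_hour : Int) : List (List (String × String)) :=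
  (assigned.foldl (pvStepA slot_hours start_hour) (PySem.Dict.empty, [])).2

-- ===== PORT B =====
-- B's body for one enumerated account; `assigned[:i]` is `assigned.take i` (i = enumerate index, ≥ 0)
def pvSlotB (assigned : List (List (String × String))) (slot_hours start_hour : Int)
    (p : Int × List (String × String)) : List (String × String) :=
  let accD := PySem.Dict.mk p.2
  match accD.get? "device_serial" with
  | some d =>
    if d ≠ "" then
      let idx : Int := ((assigned.take p.1.toNat).countP
        (fun prev => (PySem.Dict.mk prev).get? "device_serial" == some d) : Nat)
      let s := PySem.Int.mod (start_hour + idx * slot_hours) 24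
      ((accD.insert "start_time" (PySem.Int.toStr s)).insert "end_time"
        (PySem.Int.toStr (PySem.Int.mod (s + slot_hours) 24))).items
    else
      ((accD.insert "start_time" "0").insert "end_time" "0").items
  | none =>
      ((accD.insert "start_time" "0").insert "end_time" "0").items

def stagger_per_device_alt (assigned : List (List (String × String))) (slot_hours : Int) (start_hour : Int) : List (List (String × String)) :=
  (PySem.List.enumerate assigned).map (pvSlotB assigned slot_hours start_hour)

-- ===== PRECONDITION & SPEC =====
def Spec_stagger_per_device (assigned : List (List (String × String))) (slot_hours : Int) (start_hour : Int) (out : List (List (String × String))) : Prop := out = stagger_per_device_alt assigned slot_hours start_hour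
instance (assigned : List (List (String × String))) (slot_hours : Int) (start_hour : Int) (out : List (List (String × String))) : Decidable (Spec_stagger_per_device assigned slot_hours start_hour out) := by unfold Spec_stagger_per_device; infer_instance

-- ===== CLAIM (what is proved, stated in full; the proofs are below) =====
def Claim_equal_stagger_per_device : Prop := ∀ (assigned : List (List (String × String))) (slot_hours : Int) (start_hour : Int), Dom_stagger_per_device assigned slot_hours start_hour → Spec_stagger_per_device assigned slot_hours start_hour (stagger_per_device assigned slot_hours start_hour)

-- ===== LEMMAS AND PROOFS =====

-- number of accounts in xs whose device_serial is d (the predicate B counts with)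
def pvCnt (xs : List (List (String × String))) (d : String) : Nat :=
  xs.countP (fun prev => (PySem.Dict.mk prev).get? "device_serial" == some d)

-- main invariant lemma: folding A's step over `rest` after having processed `pre`
-- (with the counter dict D agreeing with pvCnt on pre) emits exactly B's values.
theorem pvMain (slot_hours start_hour : Int) :
    ∀ (rest pre : List (List (String × String))) (D : PySem.Dict String Int)
      (out : List (List (String × String))),
      (∀ d : String, d ≠ "" → D.getD d 0 = (pvCnt pre d : Int)) →
      (rest.foldl (pvStepA slot_hours start_hour) (D, out)).2
        = out ++ (PySem.List.enumerate rest (pre.length : Int)).map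
            (pvSlotB (pre ++ rest) slot_hours start_hour) := by
  intro rest
  induction rest with
  | nil => intro pre D out _; simp [PySem.List.enumerate_nil]
  | cons acc rest' ih =>
    intro pre D out h
    rw [List.foldl_cons, PySem.List.enumerate_cons, List.map_cons]
    have htake : (pre ++ acc :: rest').take ((pre.length : Int)).toNat = pre := by
      simp [List.take_left']
    rcases hg : (PySem.Dict.mk acc).get? "device_serial" with _ | d0
    · -- ds missing: falsy branch
      have hz : pvSlotB (pre ++ acc :: rest') slot_hours start_hour ((pre.length : Int), acc)
          = (((PySem.Dict.mk acc).insert "start_time" "0").insert "end_time" "0").items := by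
        simp [pvSlotB, hg]
      have hstep : pvStepA slot_hours start_hour (D, out) acc
          = (D, out ++ [(((PySem.Dict.mk acc).insert "start_time" "0").insert "end_time" "0").items]) := by
        simp [pvStepA, hg]
      have h' : ∀ d : String, d ≠ "" → D.getD d 0 = (pvCnt (pre ++ [acc]) d : Int) := by
        intro d hd
        have hc : pvCnt (pre ++ [acc]) d = pvCnt pre d := by
          simp [pvCnt, List.countP_append, hg]
        rw [hc]; exact h d hd
      have hih := ih (pre ++ [acc]) D
        (out ++ [(((PySem.Dict.mk acc).insert "start_time" "0").insert "end_time" "0").items]) h'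
      rw [hstep, hih, hz]
      simp
    · by_cases hd0 : d0 = ""
      · -- ds = "": falsy branch
        subst hd0
        have hz : pvSlotB (pre ++ acc :: rest') slot_hours start_hour ((pre.length : Int), acc)
            = (((PySem.Dict.mk acc).insert "start_time" "0").insert "end_time" "0").items := by
          simp [pvSlotB, hg]
        have hstep : pvStepA slot_hours start_hour (D, out) acc
            = (D, out ++ [(((PySem.Dict.mk acc).insert "start_time" "0").insert "end_time" "0").items]) := by
          simp [pvStepA, hg]
        have h' : ∀ d : String, d ≠ "" → D.getD d 0 = (pvCnt (pre ++ [acc]) d : Int) := by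
          intro d hd
          have hc : pvCnt (pre ++ [acc]) d = pvCnt pre d := by
            simp [pvCnt, List.countP_append, hg]
            intro hcontra; exact hd hcontra
          rw [hc]; exact h d hd
        have hih := ih (pre ++ [acc]) D
          (out ++ [(((PySem.Dict.mk acc).insert "start_time" "0").insert "end_time" "0").items]) h'
        rw [hstep, hih, hz]
        simp
      · -- truthy device serial d0
        have hidx : (if D.contains d0 then D else D.insert d0 0).getD d0 0
            = (pvCnt pre d0 : Int) := by
          by_cases hc : D.contains d0
          · simp [hc]; exact h d0 hd0
          · have hcf : D.contains d0 = false := by simpa using hc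
            have h0 := h d0 hd0
            rw [PySem.Dict.getD_of_not_contains D 0 hcf] at h0
            simp [hc, PySem.Dict.getD_insert_self]
            omega
        have hB : pvSlotB (pre ++ acc :: rest') slot_hours start_hour ((pre.length : Int), acc)
            = (((PySem.Dict.mk acc).insert "start_time"
                  (PySem.Int.toStr (PySem.Int.mod (start_hour + (pvCnt pre d0 : Int) * slot_hours) 24))).insert
                "end_time"
                  (PySem.Int.toStr (PySem.Int.mod
                    (PySem.Int.mod (start_hour + (pvCnt pre d0 : Int) * slot_hours) 24 + slot_hours) 24))).items := by
          simp [pvSlotB, hg, hd0, pvCnt]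
        have hstep : pvStepA slot_hours start_hour (D, out) acc
            = ((if D.contains d0 then D else D.insert d0 0).insert d0 ((pvCnt pre d0 : Int) + 1),
               out ++ [(((PySem.Dict.mk acc).insert "start_time"
                  (PySem.Int.toStr (PySem.Int.mod (start_hour + (pvCnt pre d0 : Int) * slot_hours) 24))).insert
                "end_time"
                  (PySem.Int.toStr (PySem.Int.mod
                    (PySem.Int.mod (start_hour + (pvCnt pre d0 : Int) * slot_hours) 24 + slot_hours) 24))).items]) := by
          simp [pvStepA, hg, hd0, hidx]
        have h' : ∀ d : String, d ≠ "" →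
            ((if D.contains d0 then D else D.insert d0 0).insert d0 ((pvCnt pre d0 : Int) + 1)).getD d 0
              = (pvCnt (pre ++ [acc]) d : Int) := by
          intro d hd
          rw [PySem.Dict.getD_insert]
          by_cases hdd : d = d0
          · subst hdd
            have hc : pvCnt (pre ++ [acc]) d = pvCnt pre d + 1 := by
              simp [pvCnt, List.countP_append, hg]
            simp [hc]
          · have hdi : (if D.contains d0 then D else D.insert d0 0).getD d 0 = D.getD d 0 := by
              by_cases hc : D.contains d0
              · simp [hc]
              · simp [hc, PySem.Dict.getD_insert, hdd]
            have hc : pvCnt (pre ++ [acc]) d = pvCnt pre d := by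
              simp [pvCnt, List.countP_append, hg]
              intro hcontra; exact hdd hcontra.symm
            simp [hdd, hdi, hc, h d hd]
        have hih := ih (pre ++ [acc])
          ((if D.contains d0 then D else D.insert d0 0).insert d0 ((pvCnt pre d0 : Int) + 1))
          (out ++ [(((PySem.Dict.mk acc).insert "start_time"
                  (PySem.Int.toStr (PySem.Int.mod (start_hour + (pvCnt pre d0 : Int) * slot_hours) 24))).insert
                "end_time"
                  (PySem.Int.toStr (PySem.Int.mod
                    (PySem.Int.mod (start_hour + (pvCnt pre d0 : Int) * slot_hours) 24 + slot_hours) 24))).items]) h'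
        rw [hstep, hih, hB]
        simp
theorem stagger_per_device_spec' (assigned : List (List (String × String))) (slot_hours start_hour : Int) :
    stagger_per_device assigned slot_hours start_hour = stagger_per_device_alt assigned slot_hours start_hour := by
  have h := pvMain slot_hours start_hour assigned [] PySem.Dict.empty []
    (by intro d _; simp [pvCnt, PySem.Dict.getD_empty])
  simpa [stagger_per_device, stagger_per_device_alt, PySem.List.enumerate] using h

-- ===== VERDICT (by name: the statement is the Claim_ definition above) =====
theorem stagger_per_device_spec : Claim_equal_stagger_per_device := by
  intro assigned slot_hours start_hour _
  exact stagger_per_device_spec' assigned slot_hours start_hour
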